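-- pv_equiv track=rewrite | github.com/RandBats/randbats_data | src/readers/turns_reader.py | _split_into_active_and_end_turn_lines
-- ===== SOURCE A (Python) =====
-- def _split_into_active_and_end_turn_lines(turn_text: str) -> dict[str, list[str]]:
--     turn_lines = turn_text.split("\n|")[1:]
--     turn_actions = {
--         "active": [],
--         "end": [],
--     }
--     target_list = "active"
--     for line in turn_lines:
--         if line == "":
--             target_list = "end"
--         turn_actions[target_list].append(line)
--     return turn_actions
-- ===== SOURCE B (Python) =====
-- def _split_into_active_and_end_turn_lines(turn_text: str) -> dict[str, list[str]]:
--     lines = turn_text.split("\n|")[1:]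
--     try:
--         i = lines.index("")
--     except ValueError:
--         i = len(lines)
--     return {"active": lines[:i], "end": lines[i:]}
-- ===== Notes on version B (the rewrite author's own statement) =====
-- stated objective: simpler
-- what changed: Replaces the single-pass loop with a mutable target-list flag by a find-then-slice decomposition: locate the first empty line with list.index (len(lines) if absent) and return the two slices around it.
import Mathlib
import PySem

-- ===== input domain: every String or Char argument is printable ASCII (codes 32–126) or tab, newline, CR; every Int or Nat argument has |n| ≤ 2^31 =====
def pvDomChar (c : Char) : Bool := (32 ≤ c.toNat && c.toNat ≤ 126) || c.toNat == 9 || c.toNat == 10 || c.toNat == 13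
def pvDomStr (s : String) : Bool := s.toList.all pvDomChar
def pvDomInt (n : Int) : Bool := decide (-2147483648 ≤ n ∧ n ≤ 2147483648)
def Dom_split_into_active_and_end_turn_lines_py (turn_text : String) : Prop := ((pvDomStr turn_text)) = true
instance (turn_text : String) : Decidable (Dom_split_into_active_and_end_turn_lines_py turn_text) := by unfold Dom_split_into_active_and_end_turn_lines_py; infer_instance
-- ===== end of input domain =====

-- B replaces A's stateful target-flag loop by find-first-empty-line + slice (simpler decomposition, same O(n)).
-- ===== PORT A =====
-- A's for-loop over turn_lines, threading the (target_list, turn_actions) state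
def pvLoopA (turn_lines : List String)
    (st : String × PySem.Dict String (List String)) : String × PySem.Dict String (List String) :=
  turn_lines.foldl
    (fun st line =>
      let target := if line == "" then "end" else st.1
      (target, st.2.modify target [] (· ++ [line])))
    st

def split_into_active_and_end_turn_lines_py (turn_text : String) : List (String × List String) :=
  let turn_lines := PySem.List.slice ((PySem.Str.split? turn_text "\n|").getD []) (some 1) none
  let turn_actions : PySem.Dict String (List String) :=
    PySem.Dict.ofList [("active", []), ("end", [])]
  (pvLoopA turn_lines ("active", turn_actions)).2.items

-- ===== PORT B =====
def split_into_active_and_end_turn_lines_py_alt (turn_text : String) : List (String × List String) :=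
  let lines := PySem.List.slice ((PySem.Str.split? turn_text "\n|").getD []) (some 1) none
  let i := (PySem.List.index? lines "").getD lines.length
  [("active", lines.take i), ("end", lines.drop i)]

-- ===== PRECONDITION & SPEC =====
def Spec_split_into_active_and_end_turn_lines_py (turn_text : String) (out : List (String × List String)) : Prop := out = split_into_active_and_end_turn_lines_py_alt turn_text
instance (turn_text : String) (out : List (String × List String)) : Decidable (Spec_split_into_active_and_end_turn_lines_py turn_text out) := by unfold Spec_split_into_active_and_end_turn_lines_py; infer_instance

-- ===== CLAIM (what is proved, stated in full; the proofs are below) =====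
def Claim_equal_split_into_active_and_end_turn_lines_py : Prop := ∀ (turn_text : String), Dom_split_into_active_and_end_turn_lines_py turn_text → Spec_split_into_active_and_end_turn_lines_py turn_text (split_into_active_and_end_turn_lines_py turn_text)

-- ===== LEMMAS AND PROOFS =====

-- one loop step on the literal two-key dict
theorem pvModify_active (a e : List String) (l : String) :
    (PySem.Dict.mk [("active", a), ("end", e)]).modify "active" [] (· ++ [l]) =
    PySem.Dict.mk [("active", a ++ [l]), ("end", e)] := by
  simp [PySem.Dict.modify, PySem.Dict.insert, PySem.Dict.getD, PySem.Dict.get?, PySem.Dict.contains]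

theorem pvModify_end (a e : List String) (l : String) :
    (PySem.Dict.mk [("active", a), ("end", e)]).modify "end" [] (· ++ [l]) =
    PySem.Dict.mk [("active", a), ("end", e ++ [l])] := by
  simp [PySem.Dict.modify, PySem.Dict.insert, PySem.Dict.getD, PySem.Dict.get?, PySem.Dict.contains]

-- once the flag reached "end", every remaining line is appended to "end"
theorem pvLoopA_end (ls : List String) (a e : List String) :
    pvLoopA ls ("end", PySem.Dict.mk [("active", a), ("end", e)]) =
    ("end", PySem.Dict.mk [("active", a), ("end", e ++ ls)]) := by
  induction ls generalizing e with
  | nil => simp [pvLoopA]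
  | cons l ls ih =>
      have hstep : (if (l == "") = true then "end" else "end") = "end" := by
        cases h : l == "" <;> rfl
      simp only [pvLoopA, List.foldl_cons] at ih ⊢
      rw [hstep, pvModify_end, ih]
      simp

-- while the flag is "active", the loop splits the list at the first empty line
theorem pvLoopA_active (ls : List String) (a e : List String) :
    (pvLoopA ls ("active", PySem.Dict.mk [("active", a), ("end", e)])).2 =
    PySem.Dict.mk
      [("active", a ++ ls.take ((PySem.List.index? ls "").getD ls.length)),
       ("end", e ++ ls.drop ((PySem.List.index? ls "").getD ls.length))] := by
  induction ls generalizing a with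
  | nil => simp [pvLoopA, PySem.List.index?]
  | cons l ls ih =>
      by_cases hl : l = ""
      · subst hl
        have h0 : PySem.List.index? ("" :: ls) "" = some 0 :=
          PySem.List.index?_cons_self "" ls
        simp only [pvLoopA, List.foldl_cons] at ih ⊢
        rw [if_pos (by rfl), pvModify_end]
        rw [show List.foldl
              (fun (st : String × PySem.Dict String (List String)) line =>
                (if (line == "") = true then "end" else st.1,
                  st.2.modify (if (line == "") = true then "end" else st.1) [] fun x => x ++ [line]))
              ("end", PySem.Dict.mk [("active", a), ("end", e ++ [""])]) ls =
            pvLoopA ls ("end", PySem.Dict.mk [("active", a), ("end", e ++ [""])]) from rfl]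
        rw [pvLoopA_end, h0]
        simp
      · have hne : (l == "") = false := by simp [hl]
        have hidx : PySem.List.index? (l :: ls) "" =
            (PySem.List.index? ls "").map (· + 1) :=
          PySem.List.index?_cons_of_ne ls hl
        simp only [pvLoopA, List.foldl_cons] at ih ⊢
        rw [hne]
        simp only [Bool.false_eq_true, if_false]
        rw [pvModify_active, ih (a ++ [l])]
        have hgetD : ((PySem.List.index? (l :: ls) "").getD (l :: ls).length) =
            ((PySem.List.index? ls "").getD ls.length) + 1 := by
          rw [hidx]
          cases PySem.List.index? ls "" <;> simp
        rw [hgetD]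
        simp

-- ===== VERDICT (by name: the statement is the Claim_ definition above) =====
theorem split_into_active_and_end_turn_lines_py_spec : Claim_equal_split_into_active_and_end_turn_lines_py := by
  intro turn_text _
  unfold Spec_split_into_active_and_end_turn_lines_py
  unfold split_into_active_and_end_turn_lines_py split_into_active_and_end_turn_lines_py_alt
  have hd : (PySem.Dict.ofList [("active", ([] : List String)), ("end", [])]) =
      PySem.Dict.mk [("active", []), ("end", [])] := by decide
  simp only [hd]
  rw [pvLoopA_active]
  simp
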